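-- pv_equiv track=rewrite | github.com/ISOFT5-SA/ISOFT5_SA | tarea 1.py | validar_correo_simple
-- ===== SOURCE A (Python) =====
-- def validar_correo_simple(correo):
--   if not correo:
--     return False
--   if "@" not in correo or "." not in correo:
--     return False
--
--   caracteres_permitidos = "abcdefghijklmnopqrstuvwxyzABCDEFGHIJKLMNOPQRSTUVWXYZ0123456789@."
--   for caracter in correo:
--     if caracter not in caracteres_permitidos:
--       return False
--   return True
-- ===== SOURCE B (Python) =====
-- def validar_correo_simple(correo):
--     tiene_arroba = False
--     tiene_punto = False
--     for c in correo:
--         o = ord(c)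
--         if o == 64:          # '@'
--             tiene_arroba = True
--         elif o == 46:        # '.'
--             tiene_punto = True
--         elif not (48 <= o <= 57 or 65 <= o <= 90 or 97 <= o <= 122):
--             return False     # not a digit or ASCII letter
--     return tiene_arroba and tiene_punto
-- ===== Notes on version B (the rewrite author's own statement) =====
-- stated objective: alternative
-- what changed: Replaces A's staged checks (emptiness guard, two substring-presence scans, then a whitelist-membership loop over a 64-character string) with a single pass that classifies each character arithmetically by its ord code and accumulates two presence flags (at-sign seen, dot seen), returning their conjunction at the end.
import Mathlib
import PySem

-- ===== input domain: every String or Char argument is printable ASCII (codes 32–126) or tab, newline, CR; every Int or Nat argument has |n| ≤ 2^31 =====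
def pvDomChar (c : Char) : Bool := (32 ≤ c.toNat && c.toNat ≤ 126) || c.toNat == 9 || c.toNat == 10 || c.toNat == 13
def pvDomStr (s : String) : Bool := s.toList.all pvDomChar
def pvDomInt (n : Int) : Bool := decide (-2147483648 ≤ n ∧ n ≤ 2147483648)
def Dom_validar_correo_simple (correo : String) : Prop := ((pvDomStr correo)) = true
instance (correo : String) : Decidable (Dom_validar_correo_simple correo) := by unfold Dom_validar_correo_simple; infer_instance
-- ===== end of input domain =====

-- B replaces A's staged checks (emptiness guard, two substring-presence tests, then a
-- whitelist-membership loop) by a single pass that classifies each character by its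
-- numeric code and accumulates two presence flags (objective: alternative).

-- ===== PORT A =====
-- the allowed-characters string of A
def pvAllowedA : String := "abcdefghijklmnopqrstuvwxyzABCDEFGHIJKLMNOPQRSTUVWXYZ0123456789@."

-- A's for-loop with its early return: stops at the first disallowed character.
-- 'caracter not in caracteres_permitidos' is single-char membership in a string,
-- ported exactly as char-list membership.
def pvLoopA : List Char → Bool
  | [] => true
  | c :: rest => if !(pvAllowedA.toList.contains c) then false else pvLoopA rest

def validar_correo_simple (correo : String) : Bool :=
  if correo.toList.isEmpty then false
  else if !(PySem.Str.isIn "@" correo) || !(PySem.Str.isIn "." correo) then false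
  else pvLoopA correo.toList

-- ===== PORT B =====
-- B's single pass: the two flag accumulators 'tiene_arroba'/'tiene_punto', the
-- ord-based branch chain, and the early return on a disallowed code, step for step.
def pvLoopB : List Char → Bool → Bool → Bool
  | [], a, p => a && p
  | c :: rest, a, p =>
    let o := c.toNat
    if o == 64 then pvLoopB rest true p
    else if o == 46 then pvLoopB rest a true
    else if !((48 ≤ o && o ≤ 57) || (65 ≤ o && o ≤ 90) || (97 ≤ o && o ≤ 122)) then false
    else pvLoopB rest a p

def validar_correo_simple_alt (correo : String) : Bool :=
  pvLoopB correo.toList false false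

-- ===== PRECONDITION & SPEC =====
def Spec_validar_correo_simple (correo : String) (out : Bool) : Prop := out = validar_correo_simple_alt correo
instance (correo : String) (out : Bool) : Decidable (Spec_validar_correo_simple correo out) := by unfold Spec_validar_correo_simple; infer_instance

-- ===== CLAIM (what is proved, stated in full; the proofs are below) =====
def Claim_equal_validar_correo_simple : Prop := ∀ (correo : String), Dom_validar_correo_simple correo → Spec_validar_correo_simple correo (validar_correo_simple correo)

-- ===== LEMMAS AND PROOFS =====

-- B's per-character classification, as a predicate (proof helper only)
def pvAllowedB (c : Char) : Bool :=
  c.toNat == 64 || c.toNat == 46 ||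
    (48 ≤ c.toNat && c.toNat ≤ 57) || (65 ≤ c.toNat && c.toNat ≤ 90) ||
    (97 ≤ c.toNat && c.toNat ≤ 122)

-- a single-character substring occurs iff the character is a member
theorem pv_singleton_infix_iff (c : Char) (s : List Char) : [c] <:+: s ↔ c ∈ s := by
  constructor
  · intro h; exact h.subset (by simp)
  · intro h
    rcases List.mem_iff_append.mp h with ⟨pre, suf, hs⟩
    exact ⟨pre, suf, by rw [hs]; simp⟩

theorem pv_isIn_singleton (c : Char) (s : List Char) :
    PySem.Chars.isIn [c] s = s.contains c := by
  rw [Bool.eq_iff_iff]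
  simp [PySem.Chars.isIn_iff_infix, pv_singleton_infix_iff]

-- char equality is code equality
theorem pv_char_eq_toNat (c d : Char) : (c = d) ↔ c.toNat = d.toNat := by
  constructor
  · intro h; rw [h]
  · intro h; rw [← Char.ofNat_toNat c, ← Char.ofNat_toNat d, h]

set_option maxRecDepth 4000 in
-- on codes below 128, A's whitelist membership and B's range test agree
theorem pv_allowed_all : ∀ n < 128,
    (pvAllowedA.toList.contains (Char.ofNat n)) =
      (n == 64 || n == 46 || (48 ≤ n && n ≤ 57) || (65 ≤ n && n ≤ 90) ||
        (97 ≤ n && n ≤ 122)) := by decide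

theorem pv_allowed_eq (c : Char) (h : c.toNat < 128) :
    pvAllowedA.toList.contains c = pvAllowedB c := by
  have := pv_allowed_all c.toNat h
  rwa [Char.ofNat_toNat] at this

-- A's loop is the all-characters-allowed test
theorem pv_loopA_eq (l : List Char) :
    pvLoopA l = l.all (fun c => pvAllowedA.toList.contains c) := by
  induction l with
  | nil => rfl
  | cons c rest ih =>
      by_cases h : pvAllowedA.toList.contains c = true <;>
        simp [pvLoopA, h, ih]

-- B's loop computes: every character allowed, and each flag or the presence of its char
theorem pv_loopB_eq (l : List Char) (a p : Bool) :
    pvLoopB l a p =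
      (l.all pvAllowedB && (a || l.contains '@') && (p || l.contains '.')) := by
  induction l generalizing a p with
  | nil => simp [pvLoopB]
  | cons c rest ih =>
      by_cases h64 : c.toNat = 64
      · have hc : c = '@' := by rw [pv_char_eq_toNat]; exact h64
        subst hc
        simp [pvLoopB, ih, pvAllowedB]
      · by_cases h46 : c.toNat = 46
        · have hc : c = '.' := by rw [pv_char_eq_toNat]; exact h46
          subst hc
          simp [pvLoopB, ih, pvAllowedB]
        · have hne1 : ¬('@' = c) := by intro h; exact h64 (by rw [← h]; rfl)
          have hne2 : ¬('.' = c) := by intro h; exact h46 (by rw [← h]; rfl)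
          by_cases hr : ((48 ≤ c.toNat && c.toNat ≤ 57) || (65 ≤ c.toNat && c.toNat ≤ 90) ||
              (97 ≤ c.toNat && c.toNat ≤ 122)) = true
          · have hAB : pvAllowedB c = true := by
              simp only [Bool.or_eq_true, Bool.and_eq_true, decide_eq_true_eq] at hr
              simp only [pvAllowedB, Bool.or_eq_true, Bool.and_eq_true, decide_eq_true_eq,
                beq_iff_eq]
              omega
            simp [pvLoopB, h64, h46, hr, ih, hAB, hne1, hne2]
          · have hAB : pvAllowedB c = false := by
              simp only [Bool.or_eq_true, Bool.and_eq_true, decide_eq_true_eq,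
                Bool.not_eq_true] at hr
              simp only [pvAllowedB, Bool.or_eq_false_iff, Bool.and_eq_false_iff,
                decide_eq_false_iff_not, beq_eq_false_iff_ne, ne_eq]
              omega
            simp [pvLoopB, h64, h46, hr, hAB]

-- ===== VERDICT (by name: the statement is the Claim_ definition above) =====
theorem validar_correo_simple_spec : Claim_equal_validar_correo_simple := by
  intro correo hdom
  unfold Spec_validar_correo_simple validar_correo_simple validar_correo_simple_alt
  have hdom' : ∀ c ∈ correo.toList, pvDomChar c = true := by
    simpa [Dom_validar_correo_simple, pvDomStr, List.all_eq_true] using hdom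
  have hall : correo.toList.all (fun c => pvAllowedA.toList.contains c)
      = correo.toList.all pvAllowedB := by
    rw [Bool.eq_iff_iff]; simp only [List.all_eq_true]
    constructor <;> intro h c hc <;>
      · have hd := hdom' c hc
        have hlt : c.toNat < 128 := by
          simp [pvDomChar] at hd; omega
        have heq := pv_allowed_eq c hlt
        first
          | (rw [← heq]; exact h c hc)
          | (rw [heq]; exact h c hc)
  rw [pv_loopB_eq]
  have h1 : ("@".toList) = ['@'] := rfl
  have h2 : (".".toList) = ['.'] := rfl
  simp only [PySem.Str.isIn_eq, h1, h2, pv_isIn_singleton, pv_loopA_eq, hall]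
  by_cases hA : correo.toList.contains '@' = true
  · have hne : correo.toList ≠ [] := by intro h; rw [h] at hA; simp at hA
    by_cases hD : correo.toList.contains '.' = true <;>
      simp [hA, hD, List.isEmpty_iff, hne] <;> ac_rfl
  · by_cases he : correo.toList = [] <;>
      simp [hA, List.isEmpty_iff, he] <;> ac_rfl
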